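-- pv_equiv track=rewrite | github.com/ErjonIsmajli/siguriaetedhenave_gr9 | keyword_cipher.py | build_keyword_alphabet
-- ===== SOURCE A (Python) =====
-- def build_keyword_alphabet(keyword: str) -> str:
--     """
--     Ndërton alfabetin e ri bazuar në fjalën kyçe.
--     Hiqen duplikatet nga fjala kyçe dhe shtohen shkronjat e mbetura
--     të alfabetit standard në rend.
--
--     Args:
--         keyword: Fjala kyçe për ndërtimin e alfabetit
--
--     Returns:
--         Alfabeti i ri i ndërtuar nga fjala kyçe (26 shkronja)
--     """
--     keyword = keyword.upper().replace(" ", "")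
--     seen = set()
--     cipher_alphabet = []
--
--     # Shto shkronjat unike nga fjala kyçe
--     for char in keyword:
--         if char.isalpha() and char not in seen:
--             seen.add(char)
--             cipher_alphabet.append(char)
--
--     # Shto shkronjat e mbetura të alfabetit
--     for char in "ABCDEFGHIJKLMNOPQRSTUVWXYZ":
--         if char not in seen:
--             seen.add(char)
--             cipher_alphabet.append(char)
--
--     return "".join(cipher_alphabet)
-- ===== SOURCE B (Python) =====
-- def build_keyword_alphabet(keyword: str) -> str:
--     kw = keyword.upper().replace(" ", "")
--     seq = [c for c in kw if c.isalpha()] + list("ABCDEFGHIJKLMNOPQRSTUVWXYZ")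
--     out = []
--     while seq:
--         c = seq[0]
--         out.append(c)
--         seq = [x for x in seq[1:] if x != c]
--     return "".join(out)
-- ===== Notes on version B (the rewrite author's own statement) =====
-- stated objective: alternative
-- what changed: Replaces A's two loops with a shared mutable seen-set by building keyword letters plus the alphabet as one sequence and deduplicating it with a filter-ahead loop: repeatedly emit the head and delete all its later duplicates from the remainder (no seen set at all).
import Mathlib
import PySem

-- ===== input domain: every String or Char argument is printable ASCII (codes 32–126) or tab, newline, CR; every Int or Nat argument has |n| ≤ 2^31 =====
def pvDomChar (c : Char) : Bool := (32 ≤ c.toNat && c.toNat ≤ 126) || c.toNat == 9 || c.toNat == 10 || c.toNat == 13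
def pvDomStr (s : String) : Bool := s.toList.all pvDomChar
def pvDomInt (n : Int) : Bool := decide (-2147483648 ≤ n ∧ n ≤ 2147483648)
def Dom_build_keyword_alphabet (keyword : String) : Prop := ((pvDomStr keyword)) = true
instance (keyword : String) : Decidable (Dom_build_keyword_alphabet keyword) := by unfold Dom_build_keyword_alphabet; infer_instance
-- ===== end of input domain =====

-- B replaces A's two seen-set-guarded loops by a filter-ahead dedup: build keyword letters ++
-- alphabet, then repeatedly take the head and delete all its later duplicates (no seen set).


-- ===== PORT A =====
-- first loop body: if char.isalpha() and char not in seen: seen.add(char); cipher_alphabet.append(char)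
def bkaStep1 (p : PySem.Set Char × List Char) (c : Char) : PySem.Set Char × List Char :=
  if PySem.Chars.isalpha c && !(PySem.Set.contains p.1 c) then (PySem.Set.add p.1 c, p.2 ++ [c]) else p

-- second loop body: if char not in seen: seen.add(char); cipher_alphabet.append(char)
def bkaStep2 (p : PySem.Set Char × List Char) (c : Char) : PySem.Set Char × List Char :=
  if !(PySem.Set.contains p.1 c) then (PySem.Set.add p.1 c, p.2 ++ [c]) else p

def build_keyword_alphabet (keyword : String) : String :=
  let kw := PySem.Str.replace (PySem.Str.upper keyword) " " ""
  let st1 := kw.toList.foldl bkaStep1 (PySem.Set.empty, [])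
  let st2 := "ABCDEFGHIJKLMNOPQRSTUVWXYZ".toList.foldl bkaStep2 st1
  String.ofList st2.2

-- ===== PORT B =====
-- the while loop: take the head, drop its duplicates from the tail, recurse
def bkaTakeFirst : List Char → List Char
  | [] => []
  | c :: rest => c :: bkaTakeFirst (rest.filter (· ≠ c))
termination_by xs => xs.length
decreasing_by simpa using Nat.lt_succ_of_le ((List.length_filter_le _ _).trans (by simp))

def build_keyword_alphabet_alt (keyword : String) : String :=
  let kw := PySem.Str.replace (PySem.Str.upper keyword) " " ""
  let seq := kw.toList.filter PySem.Chars.isalpha ++ "ABCDEFGHIJKLMNOPQRSTUVWXYZ".toList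
  String.ofList (bkaTakeFirst seq)

-- ===== PRECONDITION & SPEC =====
def Spec_build_keyword_alphabet (keyword : String) (out : String) : Prop := out = build_keyword_alphabet_alt keyword
instance (keyword : String) (out : String) : Decidable (Spec_build_keyword_alphabet keyword out) := by unfold Spec_build_keyword_alphabet; infer_instance

-- ===== CLAIM (what is proved, stated in full; the proofs are below) =====
def Claim_equal_build_keyword_alphabet : Prop := ∀ (keyword : String), Dom_build_keyword_alphabet keyword → Spec_build_keyword_alphabet keyword (build_keyword_alphabet keyword)

-- ===== LEMMAS AND PROOFS =====

lemma bkaStep1_inv (xs : List Char) (s : PySem.Set Char) :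
    xs.foldl bkaStep1 (s, s) =
      ((xs.filter PySem.Chars.isalpha).foldl PySem.Set.add s,
       (xs.filter PySem.Chars.isalpha).foldl PySem.Set.add s) := by
  induction xs generalizing s with
  | nil => rfl
  | cons c xs ih =>
    simp only [List.foldl_cons, List.filter_cons, bkaStep1]
    by_cases ha : PySem.Chars.isalpha c
    · by_cases hc : c ∈ s <;> simp [ha, hc, PySem.Set.add, ih]
    · simp [ha, ih]

lemma bkaStep2_inv (xs : List Char) (s : PySem.Set Char) :
    xs.foldl bkaStep2 (s, s) = (xs.foldl PySem.Set.add s, xs.foldl PySem.Set.add s) := by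
  induction xs generalizing s with
  | nil => rfl
  | cons c xs ih =>
    simp only [List.foldl_cons, bkaStep2]
    by_cases hc : c ∈ s <;> simp [hc, PySem.Set.add, ih]

-- seen-set fold from seen-list s = s ++ filter-ahead dedup of the not-yet-seen elements
lemma foldl_add_eq_takeFirst (xs : List Char) (s : List Char) :
    xs.foldl PySem.Set.add s = s ++ bkaTakeFirst (xs.filter (· ∉ s)) := by
  induction hn : xs.length using Nat.strong_induction_on generalizing xs s with
  | _ n ih =>
    cases xs with
    | nil => simp [bkaTakeFirst]
    | cons c xs =>
      simp only [List.foldl_cons, List.filter_cons]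
      by_cases hc : c ∈ s
      · have h1 : PySem.Set.add s c = s := by simp [PySem.Set.add, hc]
        rw [h1]
        simp only [hc, not_true_eq_false, decide_false]
        exact ih xs.length (by simp [← hn]) xs s rfl
      · have hadd : PySem.Set.add s c = s ++ [c] := by simp [PySem.Set.add, hc]
        rw [hadd, ih xs.length (by simp [← hn]) xs (s ++ [c]) rfl]
        simp only [hc, not_false_eq_true, decide_true, if_true, bkaTakeFirst,
          List.append_assoc, List.singleton_append]
        rw [List.filter_filter]
        congr 2
        congr 1
        apply List.filter_congr
        intro x _
        simp [List.mem_append, and_comm, eq_comm]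

-- ===== VERDICT (by name: the statement is the Claim_ definition above) =====
theorem build_keyword_alphabet_spec : Claim_equal_build_keyword_alphabet := by
  intro keyword _
  unfold Spec_build_keyword_alphabet build_keyword_alphabet build_keyword_alphabet_alt
  dsimp only
  rw [show (PySem.Set.empty : PySem.Set Char) = ([] : List Char) from rfl]
  rw [show ((([] : List Char), ([] : List Char)) = (([] : PySem.Set Char), ([] : PySem.Set Char))) from rfl]
  rw [bkaStep1_inv, bkaStep2_inv, ← List.foldl_append, foldl_add_eq_takeFirst]
  simp
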